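-- pv_equiv track=rewrite | github.com/hirl-team/HIRL | hirl/utils/config_utils.py | add_quotation_to_string
-- ===== SOURCE A (Python) =====
-- from typing import List, Tuple
--
-- def is_number_or_bool_or_none(x):
--     try:
--         float(x)
--         return True
--     except ValueError:
--         return x in ['True', 'False', 'None']
--
-- def add_quotation_to_string(s: str,
--                             split_chars: List[str] = None) -> str:
--     if split_chars is None:
--         split_chars = ['[', ']', '{', '}', ',', ' ']
--         if '{' in s and '}' in s:
--             split_chars.append(':')
--     s_mark, marker = s, chr(1)
--     for split_char in split_chars:
--         s_mark = s_mark.replace(split_char, marker)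
--
--     s_quoted = ''
--     for value in s_mark.split(marker):
--         if len(value) == 0:
--             continue
--         st = s.find(value)
--         if is_number_or_bool_or_none(value):
--             s_quoted += s[:st] + value
--         elif value.startswith("'") and value.endswith("'") or value.startswith('"') and value.endswith('"'):
--             s_quoted += s[:st] + value
--         else:
--             s_quoted += s[:st] + '"' + value + '"'
--         s = s[st + len(value):]
--
--     return s_quoted + s
-- ===== SOURCE B (Python) =====
-- def is_number_or_bool_or_none(x):
--     try:
--         float(x)
--         return True
--     except ValueError:
--         return x in ['True', 'False', 'None']
--
-- def _wrap(t):
--     if is_number_or_bool_or_none(t):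
--         return t
--     if t.startswith("'") and t.endswith("'") or t.startswith('"') and t.endswith('"'):
--         return t
--     return '"' + t + '"'
--
-- def _split1(s, sep):
--     # str.split refuses an empty separator; an empty separator splits between
--     # every character (the splitting contract str.replace('') induces)
--     if sep == "":
--         return [""] + list(s) + [""]
--     return s.split(sep)
--
-- def _tokens(s, seps):
--     toks = [s]
--     for sep in seps:
--         toks = [piece for tok in toks for piece in _split1(tok, sep)]
--     return toks
--
-- def add_quotation_to_string(s, split_chars=None):
--     if split_chars is None:
--         split_chars = ['[', ']', '{', '}', ',', ' ']
--         if '{' in s and '}' in s: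
--             split_chars.append(':')
--     out, pos = [], 0
--     for v in _tokens(s, split_chars):
--         if not v:
--             continue
--         st = s.find(v, pos)
--         out.append(s[pos:st])
--         out.append(_wrap(v))
--         pos = st + len(v)
--     return ''.join(out) + s[pos:]
-- ===== Notes on version B (the rewrite author's own statement) =====
-- stated objective: alternative
-- what changed: A marks separator occurrences with a chr(1) sentinel via repeated str.replace over the whole string, splits on the sentinel, and rebuilds the output by repeatedly slicing a shrinking copy of s with s.find; B computes the same token list directly by level-by-level nested splitting on the separator strings (no sentinel, no marked string) and emits the output in one index-tracking sweep over the original s using find(v, pos).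
import Mathlib
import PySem

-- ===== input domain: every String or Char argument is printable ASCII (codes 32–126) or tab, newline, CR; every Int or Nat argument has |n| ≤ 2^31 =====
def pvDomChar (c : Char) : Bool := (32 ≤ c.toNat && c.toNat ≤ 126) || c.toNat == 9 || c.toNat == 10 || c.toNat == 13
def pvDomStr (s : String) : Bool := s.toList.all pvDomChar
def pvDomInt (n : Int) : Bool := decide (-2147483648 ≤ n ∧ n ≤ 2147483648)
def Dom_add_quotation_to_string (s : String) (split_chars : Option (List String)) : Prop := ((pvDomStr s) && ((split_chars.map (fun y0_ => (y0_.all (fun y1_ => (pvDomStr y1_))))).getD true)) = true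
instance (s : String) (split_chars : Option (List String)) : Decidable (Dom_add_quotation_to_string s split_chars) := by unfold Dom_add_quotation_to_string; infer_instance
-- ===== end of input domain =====

-- B replaces A's chr(1)-sentinel marking (repeated str.replace + split + find on a shrinking
-- copy of s) by level-by-level nested splitting producing the token list directly, then one
-- index-tracking sweep over s (objective: alternative, same exact output).

-- ===== PORT A =====
-- hand-written port of Python float(x) ACCEPTANCE (is float(x) a value / does it raise ValueError),
-- exact on the printable-ASCII + tab/newline/CR domain: strip, optional sign, inf/infinity/nan
-- (case-insensitive) or decimal mantissa/exponent with single underscores between digits.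
def pvIsD (c : Char) : Bool := '0' ≤ c && c ≤ '9'

def pvDigitsRest : List Char → List Char
  | '_' :: c :: r => if pvIsD c then pvDigitsRest r else '_' :: c :: r
  | c :: r => if pvIsD c then pvDigitsRest r else c :: r
  | [] => []

def pvDigits? : List Char → Option (List Char)
  | c :: r => if pvIsD c then some (pvDigitsRest r) else none
  | [] => none

def pvMantissa? (cs : List Char) : Option (List Char) :=
  match pvDigits? cs with
  | some r =>
    match r with
    | '.' :: r2 =>
      match pvDigits? r2 with
      | some r3 => some r3
      | none => some r2
    | _ => some r
  | none =>
    match cs with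
    | '.' :: r2 => pvDigits? r2
    | _ => none

def pvExpOk : List Char → Bool
  | [] => true
  | c :: r =>
    if c = 'e' || c = 'E' then
      let r2 := match r with
        | s :: r' => if s = '+' || s = '-' then r' else s :: r'
        | [] => []
      match pvDigits? r2 with
      | some [] => true
      | _ => false
    else false

def pvFloatOk (cs : List Char) : Bool :=
  let t := PySem.Chars.strip cs
  let t2 := match t with
    | c :: r => if c = '+' || c = '-' then r else c :: r
    | [] => []
  let tl := PySem.Chars.lower t2
  if tl == "inf".toList || tl == "infinity".toList || tl == "nan".toList then true
  else
    match pvMantissa? t2 with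
    | some r => pvExpOk r
    | none => false

-- A's helper is_number_or_bool_or_none (float() succeeds, or the literal words True/False/None)
def isNumberOrBoolOrNone (cs : List Char) : Bool :=
  pvFloatOk cs || cs == "True".toList || cs == "False".toList || cs == "None".toList

def add_quotation_to_string (s : String) (split_chars : Option (List String)) : String :=
  let splits : List String :=
    match split_chars with
    | none =>
      let base : List String := ["[", "]", "{", "}", ",", " "]
      if PySem.Str.isIn "{" s && PySem.Str.isIn "}" s then base ++ [":"] else base
    | some l => l
  let marker : Char := Char.ofNat 1
  let sMark : List Char := splits.foldl (fun acc t => PySem.Chars.replace acc t.toList [marker]) s.toList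
  let r := (PySem.Chars.splitOn sMark [marker]).foldl
    (fun (st : List Char × List Char) v =>
      if v.length = 0 then st
      else
        let i := PySem.Chars.find st.2 v
        let q := st.1 ++ PySem.Chars.slice st.2 none (some i) ++
          (if isNumberOrBoolOrNone v then v
           else if (PySem.Chars.startswith v ['\''] && PySem.Chars.endswith v ['\'']) ||
                   (PySem.Chars.startswith v ['"'] && PySem.Chars.endswith v ['"']) then v
           else '"' :: (v ++ ['"']))
        (q, PySem.Chars.slice st.2 (some (i + (v.length : Int))) none))
    (([], s.toList) : List Char × List Char)
  String.mk (r.1 ++ r.2)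

-- ===== PORT B =====
-- Source B's _wrap helper
def pvWrap (v : List Char) : List Char :=
  if isNumberOrBoolOrNone v then v
  else if (PySem.Chars.startswith v ['\''] && PySem.Chars.endswith v ['\'']) ||
          (PySem.Chars.startswith v ['"'] && PySem.Chars.endswith v ['"']) then v
  else '"' :: (v ++ ['"'])

-- Source B's _split1: splitting on one separator string; an empty separator splits between every char
def pvSplit1 (t : List Char) (cs : List Char) : List (List Char) :=
  if t.isEmpty then [[]] ++ cs.map (fun c => [c]) ++ [[]]
  else PySem.Chars.splitOn cs t

-- Source B's _tokens: level-by-level nested splitting on the separator list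
def pvTokens (seps : List String) (cs : List Char) : List (List Char) :=
  seps.foldl (fun toks t => toks.flatMap (fun tok => pvSplit1 t.toList tok)) [cs]

def add_quotation_to_string_alt (s : String) (split_chars : Option (List String)) : String :=
  let splits : List String :=
    match split_chars with
    | none =>
      let base : List String := ["[", "]", "{", "}", ",", " "]
      if PySem.Str.isIn "{" s && PySem.Str.isIn "}" s then base ++ [":"] else base
    | some l => l
  let r := (pvTokens splits s.toList).foldl
    (fun (st : List Char × Int) v =>
      if v.isEmpty then st
      else
        let stIdx := PySem.Chars.findFrom s.toList v st.2 none
        (st.1 ++ PySem.Chars.slice s.toList (some st.2) (some stIdx) ++ pvWrap v,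
         stIdx + (v.length : Int)))
    (([], 0) : List Char × Int)
  String.mk (r.1 ++ PySem.Chars.slice s.toList (some r.2) none)

-- ===== PRECONDITION & SPEC =====
def Spec_add_quotation_to_string (s : String) (split_chars : Option (List String)) (out : String) : Prop := out = add_quotation_to_string_alt s split_chars
instance (s : String) (split_chars : Option (List String)) (out : String) : Decidable (Spec_add_quotation_to_string s split_chars out) := by unfold Spec_add_quotation_to_string; infer_instance

-- ===== CLAIM =====
def Claim_equal_add_quotation_to_string : Prop := ∀ (s : String) (split_chars : Option (List String)), Dom_add_quotation_to_string s split_chars → Spec_add_quotation_to_string s split_chars (add_quotation_to_string s split_chars)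

-- ===== LEMMAS AND PROOFS =====

-- recursive (fuel-free) forms of PySem.Chars.splitOn / replace for a NONEMPTY pattern a :: t
def pvRsplit (a : Char) (t : List Char) : List Char → List (List Char)
  | [] => [[]]
  | c :: r =>
    if (a :: t).isPrefixOf (c :: r) then [] :: pvRsplit a t (r.drop t.length)
    else
      match pvRsplit a t r with
      | h :: hs => (c :: h) :: hs
      | [] => [[c]]
termination_by cs => cs.length
decreasing_by
  · simp only [List.length_drop, List.length_cons]; omega
  · simp only [List.length_cons]; omega

def pvRrep (m : Char) (a : Char) (t : List Char) : List Char → List Char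
  | [] => []
  | c :: r =>
    if (a :: t).isPrefixOf (c :: r) then m :: pvRrep m a t (r.drop t.length)
    else c :: pvRrep m a t r
termination_by cs => cs.length
decreasing_by
  · simp only [List.length_drop, List.length_cons]; omega
  · simp only [List.length_cons]; omega

theorem pvRsplit_ne_nil (a : Char) (t : List Char) (cs : List Char) : pvRsplit a t cs ≠ [] := by
  cases cs with
  | nil => simp [pvRsplit]
  | cons c r =>
    rw [pvRsplit]
    split
    · simp
    · split <;> simp

theorem pvRrep_cons (m a : Char) (t : List Char) (c : Char) (r : List Char) :
    pvRrep m a t (c :: r)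
      = if (a :: t).isPrefixOf (c :: r) then m :: pvRrep m a t (r.drop t.length)
        else c :: pvRrep m a t r := by
  rw [pvRrep]

theorem pvRsplit_cons (a : Char) (t : List Char) (c : Char) (r : List Char) :
    pvRsplit a t (c :: r)
      = if (a :: t).isPrefixOf (c :: r) then [] :: pvRsplit a t (r.drop t.length)
        else
          match pvRsplit a t r with
          | h :: hs => (c :: h) :: hs
          | [] => [[c]] := by
  rw [pvRsplit]

theorem pv_modifyHead_id (X : List (List Char)) : X.modifyHead (fun x => x) = X := by
  cases X <;> simp

theorem pv_splitOn_go (a : Char) (t : List Char) :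
    ∀ (fuel : Nat) (l cur : List Char) (acc : List (List Char)), l.length ≤ fuel →
    PySem.Chars.splitOn.go (a :: t) fuel l cur acc
      = acc.reverse ++ (pvRsplit a t l).modifyHead (cur.reverse ++ ·) := by
  intro fuel
  induction fuel with
  | zero =>
    intro l cur acc h
    have hl : l = [] := by cases l with | nil => rfl | cons x xs => simp at h
    subst hl
    simp [PySem.Chars.splitOn.go, pvRsplit]
  | succ f ih =>
    intro l cur acc h
    cases l with
    | nil => simp [PySem.Chars.splitOn.go, pvRsplit]
    | cons c rest =>
      rw [PySem.Chars.splitOn.go]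
      by_cases hp : (a :: t).isPrefixOf (c :: rest)
      · rw [if_pos hp]
        have hdrop : List.drop (a :: t).length (c :: rest) = rest.drop t.length := by
          simp [List.length_cons, List.drop_succ_cons]
        rw [hdrop, ih _ [] _ (by simp at h ⊢; omega)]
        rw [pvRsplit, if_pos hp]
        simp
        exact pv_modifyHead_id _
      · rw [if_neg hp, ih rest (c :: cur) acc (by simp at h; omega)]
        rw [pvRsplit, if_neg hp]
        rcases hX : pvRsplit a t rest with _ | ⟨h1, hs⟩
        · exact absurd hX (pvRsplit_ne_nil a t rest)
        · simp

theorem pv_splitOn_eq (a : Char) (t : List Char) (l : List Char) :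
    PySem.Chars.splitOn l (a :: t) = pvRsplit a t l := by
  rw [PySem.Chars.splitOn, pv_splitOn_go a t (l.length + 1) l [] [] (by omega)]
  simp
  exact pv_modifyHead_id _

theorem pv_replace_go (m a : Char) (t : List Char) :
    ∀ (fuel : Nat) (l acc : List Char), l.length ≤ fuel →
    PySem.Chars.replace.go (a :: t) [m] fuel l acc = acc.reverse ++ pvRrep m a t l := by
  intro fuel
  induction fuel with
  | zero =>
    intro l acc h
    have hl : l = [] := by cases l with | nil => rfl | cons x xs => simp at h
    subst hl
    simp [PySem.Chars.replace.go, pvRrep]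
  | succ f ih =>
    intro l acc h
    cases l with
    | nil => simp [PySem.Chars.replace.go, pvRrep]
    | cons c rest =>
      rw [PySem.Chars.replace.go]
      by_cases hp : (a :: t).isPrefixOf (c :: rest)
      · rw [if_pos hp]
        have hdrop : List.drop (a :: t).length (c :: rest) = rest.drop t.length := by
          simp [List.length_cons, List.drop_succ_cons]
        rw [hdrop, ih _ _ (by simp at h ⊢; omega)]
        rw [pvRrep, if_pos hp]
        simp
      · rw [if_neg hp, ih rest (c :: acc) (by simp at h; omega)]
        rw [pvRrep, if_neg hp]
        simp

theorem pv_replace_eq (m a : Char) (t : List Char) (l : List Char) :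
    PySem.Chars.replace l (a :: t) [m] = pvRrep m a t l := by
  rw [PySem.Chars.replace, if_neg (by simp)]
  simpa using pv_replace_go m a t l.length l []  le_rfl

theorem pv_intercalate_cons (s x : List Char) (xs : List (List Char)) (h : xs ≠ []) :
    List.intercalate s (x :: xs) = x ++ s ++ List.intercalate s xs := by
  cases xs with
  | nil => exact absurd rfl h
  | cons y t => simp [List.intercalate, List.intersperse, List.append_assoc]

theorem pv_rrep_intercalate (m a : Char) (t : List Char) (cs : List Char) :
    pvRrep m a t cs = List.intercalate [m] (pvRsplit a t cs) := by
  induction cs using pvRsplit.induct a t with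
  | case1 => simp [pvRrep, pvRsplit, List.intercalate]
  | case2 c r hp ih =>
    rw [pvRrep, if_pos hp, pvRsplit, if_pos hp,
      pv_intercalate_cons _ _ _ (pvRsplit_ne_nil a t _)]
    simp [ih]
  | case3 c r hp h1 hs hX ih =>
    rw [pvRrep, if_neg hp, pvRsplit, if_neg hp, hX]
    rw [hX] at ih
    cases hs with
    | nil => simpa [List.intercalate] using ih
    | cons h2 hs2 =>
      rw [pv_intercalate_cons [m] h1 (h2 :: hs2) (by simp)] at ih
      rw [pv_intercalate_cons [m] (c :: h1) (h2 :: hs2) (by simp)]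
      simp only [List.cons_append, List.append_assoc] at ih ⊢
      rw [ih]
  | case4 c r hp hX ih =>
    exact absurd hX (pvRsplit_ne_nil a t r)

theorem pv_intercalate_rsplit (a : Char) (t : List Char) (cs : List Char) :
    List.intercalate (a :: t) (pvRsplit a t cs) = cs := by
  induction cs using pvRsplit.induct a t with
  | case1 => simp [pvRsplit, List.intercalate]
  | case2 c r hp ih =>
    rw [pvRsplit, if_pos hp, pv_intercalate_cons _ _ _ (pvRsplit_ne_nil a t _)]
    obtain ⟨u, hu⟩ := List.isPrefixOf_iff_prefix.mp hp
    rw [List.cons_append] at hu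
    injection hu with h1 h2
    subst h1
    rw [ih]
    have hr : r = t ++ u := h2.symm
    subst hr
    simp
  | case3 c r hp h1 hs hX ih =>
    rw [pvRsplit, if_neg hp, hX]
    rw [hX] at ih
    cases hs with
    | nil => simpa [List.intercalate] using ih
    | cons h2 hs2 =>
      rw [pv_intercalate_cons (a :: t) h1 (h2 :: hs2) (by simp)] at ih
      rw [pv_intercalate_cons (a :: t) (c :: h1) (h2 :: hs2) (by simp)]
      simp only [List.cons_append, List.append_assoc] at ih ⊢
      rw [ih]
  | case4 c r hp hX ih =>
    exact absurd hX (pvRsplit_ne_nil a t r)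

theorem pv_rsplit_mfree (m a : Char) (t : List Char) (cs : List Char) (h : m ∉ cs) :
    ∀ p ∈ pvRsplit a t cs, m ∉ p := by
  induction cs using pvRsplit.induct a t with
  | case1 => intro p hp; simp [pvRsplit] at hp; simp [hp]
  | case2 c r hp ih =>
    intro p hmem
    rw [pvRsplit, if_pos hp] at hmem
    rcases List.mem_cons.mp hmem with rfl | hmem2
    · simp
    · exact ih (fun hmr => h (List.mem_cons_of_mem _ ((List.drop_sublist _ _).subset hmr))) p hmem2
  | case3 c r hp h1 hs hX ih =>
    intro p hmem
    have hr : m ∉ r := fun hmr => h (List.mem_cons_of_mem _ hmr)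
    have hc : m ≠ c := fun hEq => h (by simp [hEq])
    rw [pvRsplit, if_neg hp, hX] at hmem
    rcases List.mem_cons.mp hmem with rfl | hmem2
    · intro hmp
      rcases List.mem_cons.mp hmp with rfl | hmh
      · exact hc rfl
      · exact ih hr h1 (by rw [hX]; exact List.mem_cons_self) hmh
    · exact ih hr p (by rw [hX]; exact List.mem_cons_of_mem _ hmem2)
  | case4 c r hp hX ih =>
    exact absurd hX (pvRsplit_ne_nil a t r)

theorem pv_isPrefixOf_append_marker (m : Char) (p : List Char) (hm : m ∉ p) :
    ∀ (x y : List Char), p.isPrefixOf (x ++ m :: y) = p.isPrefixOf x := by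
  induction p with
  | nil => intro x y; simp [List.isPrefixOf]
  | cons d p' ih =>
    intro x y
    have hd : d ≠ m := fun hEq => hm (by simp [hEq])
    cases x with
    | nil => simp [List.isPrefixOf, hd]
    | cons e x' =>
      simp only [List.cons_append, List.isPrefixOf]
      rw [ih (fun hmem => hm (List.mem_cons_of_mem _ hmem)) x' y]

theorem pv_rrep_dist (m a : Char) (t : List Char) (hm : m ∉ a :: t) (u v : List Char) :
    pvRrep m a t (u ++ m :: v) = pvRrep m a t u ++ m :: pvRrep m a t v := by
  have ham : a ≠ m := fun hEq => hm (by simp [hEq])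
  have key : ∀ (n : Nat) (u v : List Char), u.length ≤ n →
      pvRrep m a t (u ++ m :: v) = pvRrep m a t u ++ m :: pvRrep m a t v := by
    intro n
    induction n with
    | zero =>
      intro u v hu
      have hu0 : u = [] := by cases u with | nil => rfl | cons x xs => simp at hu
      subst hu0
      rw [List.nil_append, pvRrep_cons, if_neg (by simp [List.isPrefixOf, ham])]
      simp [pvRrep]
    | succ f ih =>
      intro u v hu
      cases u with
      | nil =>
        rw [List.nil_append, pvRrep_cons, if_neg (by simp [List.isPrefixOf, ham])]
        simp [pvRrep]
      | cons c r =>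
        have hPP : (a :: t).isPrefixOf ((c :: r) ++ m :: v) = (a :: t).isPrefixOf (c :: r) :=
          pv_isPrefixOf_append_marker m (a :: t) hm (c :: r) v
        by_cases hp : (a :: t).isPrefixOf (c :: r)
        · have hlen : t.length ≤ r.length := by
            have := (List.isPrefixOf_iff_prefix.mp hp).length_le
            simpa using this
          rw [List.cons_append, pvRrep_cons, if_pos (by rw [← List.cons_append, hPP]; exact hp)]
          rw [List.drop_append_of_le_length hlen]
          rw [ih _ v (by simp at hu ⊢; omega)]
          rw [pvRrep_cons, if_pos hp]
          simp
        · rw [List.cons_append, pvRrep_cons,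
            if_neg (by rw [← List.cons_append, hPP]; exact hp)]
          rw [ih r v (by simp at hu; omega)]
          rw [pvRrep_cons, if_neg hp]
          simp
  exact key u.length u v le_rfl

theorem pv_replace_dist (m : Char) (t' : List Char) (hm : m ∉ t') (u v : List Char) :
    PySem.Chars.replace (u ++ m :: v) t' [m]
      = PySem.Chars.replace u t' [m] ++ m :: PySem.Chars.replace v t' [m] := by
  cases t' with
  | nil => simp [PySem.Chars.replace]
  | cons a t =>
    rw [pv_replace_eq, pv_replace_eq, pv_replace_eq]
    exact pv_rrep_dist m a t hm u v

-- the marking fold shared by the proofs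
def pvFold (m : Char) (ts : List String) (cs : List Char) : List Char :=
  ts.foldl (fun acc t => PySem.Chars.replace acc t.toList [m]) cs

theorem pv_fold_dist (m : Char) (ts : List String) (hm : ∀ t ∈ ts, m ∉ t.toList) (u v : List Char) :
    pvFold m ts (u ++ m :: v) = pvFold m ts u ++ m :: pvFold m ts v := by
  induction ts generalizing u v with
  | nil => simp [pvFold]
  | cons t ts' ih =>
    simp only [pvFold, List.foldl_cons]
    rw [pv_replace_dist m t.toList (hm t List.mem_cons_self) u v]
    exact ih (fun t' ht' => hm t' (List.mem_cons_of_mem _ ht')) _ _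

theorem pv_rsplit_marker_append (m : Char) (x y : List Char) :
    pvRsplit m [] (x ++ m :: y) = pvRsplit m [] x ++ pvRsplit m [] y := by
  induction x with
  | nil =>
    rw [List.nil_append, pvRsplit_cons, if_pos (by simp [List.isPrefixOf])]
    simp [pvRsplit]
  | cons c x' ih =>
    by_cases hc : m = c
    · subst hc
      rw [List.cons_append, pvRsplit_cons, if_pos (by simp [List.isPrefixOf])]
      rw [pvRsplit_cons, if_pos (by simp [List.isPrefixOf])]
      simp [ih]
    · rw [List.cons_append, pvRsplit_cons, if_neg (by simp [List.isPrefixOf, hc])]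
      rw [pvRsplit_cons (a := m) (t := []) (c := c) (r := x'),
        if_neg (by simp [List.isPrefixOf, hc])]
      rw [ih]
      rcases hX : pvRsplit m [] x' with _ | ⟨h1, hs⟩
      · exact absurd hX (pvRsplit_ne_nil m [] x')
      · simp

theorem pv_rsplit_no_marker (m : Char) (cs : List Char) (h : m ∉ cs) :
    pvRsplit m [] cs = [cs] := by
  induction cs with
  | nil => simp [pvRsplit]
  | cons c r ih =>
    have hc : m ≠ c := fun hEq => h (by simp [hEq])
    rw [pvRsplit_cons, if_neg (by simp [List.isPrefixOf, hc])]
    rw [ih (fun hmr => h (List.mem_cons_of_mem _ hmr))]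

theorem pv_split_fold_intercalate (m : Char) (ts : List String) (hm : ∀ t ∈ ts, m ∉ t.toList) :
    ∀ ps : List (List Char), ps ≠ [] →
    pvRsplit m [] (pvFold m ts (List.intercalate [m] ps))
      = ps.flatMap (fun p => pvRsplit m [] (pvFold m ts p)) := by
  intro ps
  induction ps with
  | nil => intro h; exact absurd rfl h
  | cons p ps' ih =>
    intro _
    cases ps' with
    | nil => simp [List.intercalate]
    | cons q qs =>
      rw [pv_intercalate_cons [m] p (q :: qs) (by simp)]
      rw [List.append_assoc, List.singleton_append]
      rw [pv_fold_dist m ts hm]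
      rw [pv_rsplit_marker_append]
      rw [ih (by simp)]
      simp

theorem pv_intercalate_map_singletons (m : Char) (cs : List Char) :
    List.intercalate [m] (cs.map (fun c => [c]) ++ [[]])
      = cs.flatMap (fun c => c :: [m]) := by
  induction cs with
  | nil => simp [List.intercalate]
  | cons c r ih =>
    rw [List.map_cons, List.cons_append,
      pv_intercalate_cons [m] [c] (r.map (fun c => [c]) ++ [[]]) (by simp)]
    rw [ih]
    simp

theorem pv_replace_intercalate_split1 (m : Char) (t' : List Char) (cs : List Char) :
    PySem.Chars.replace cs t' [m] = List.intercalate [m] (pvSplit1 t' cs) := by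
  cases t' with
  | nil =>
    rw [PySem.Chars.replace, if_pos (by simp)]
    unfold pvSplit1
    rw [if_pos (by simp)]
    rw [List.append_assoc]
    have hshape : ([[]] : List (List Char)) ++ (cs.map (fun c => [c]) ++ [[]])
        = [] :: (cs.map (fun c => [c]) ++ [[]]) := rfl
    rw [hshape, pv_intercalate_cons [m] [] (cs.map (fun c => [c]) ++ [[]]) (by simp)]
    rw [pv_intercalate_map_singletons]
    simp
  | cons a t =>
    rw [pv_replace_eq, pv_rrep_intercalate]
    unfold pvSplit1
    rw [if_neg (by simp), pv_splitOn_eq]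

theorem pv_split1_ne_nil (t' cs : List Char) : pvSplit1 t' cs ≠ [] := by
  cases t' with
  | nil => simp [pvSplit1]
  | cons a t =>
    unfold pvSplit1
    rw [if_neg (by simp), pv_splitOn_eq]
    exact pvRsplit_ne_nil a t cs

theorem pv_split1_mfree (m : Char) (t' cs : List Char) (h : m ∉ cs) :
    ∀ p ∈ pvSplit1 t' cs, m ∉ p := by
  cases t' with
  | nil =>
    intro p hp
    unfold pvSplit1 at hp
    rw [if_pos (by simp)] at hp
    simp only [List.append_assoc, List.singleton_append, List.mem_cons, List.mem_append,
      List.mem_map, List.mem_singleton] at hp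
    rcases hp with (rfl | ⟨c, hc, rfl⟩) | (rfl | h0)
    · simp
    · intro hmp
      rw [List.mem_singleton] at hmp
      exact h (hmp ▸ hc)
    · simp
    · exact absurd h0 (List.not_mem_nil)
  | cons a t =>
    unfold pvSplit1
    rw [if_neg (by simp), pv_splitOn_eq]
    exact pv_rsplit_mfree m a t cs h

-- recursive (depth-first) form of the nested splitting, for the proofs
def pvTokensRec (seps : List String) (cs : List Char) : List (List Char) :=
  match seps with
  | [] => [cs]
  | t :: ts => (pvSplit1 t.toList cs).flatMap (pvTokensRec ts)

theorem pv_flatMap_flatMap (ps : List (List Char)) (f g : List Char → List (List Char)) :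
    (ps.flatMap f).flatMap g = ps.flatMap (fun p => (f p).flatMap g) := by
  induction ps with
  | nil => simp
  | cons p ps ih => simp [ih]

theorem pv_tokens_flatMap (ts : List String) : ∀ ps : List (List Char),
    ts.foldl (fun toks t => toks.flatMap (fun tok => pvSplit1 t.toList tok)) ps
      = ps.flatMap (pvTokensRec ts) := by
  induction ts with
  | nil => intro ps; simp [pvTokensRec]
  | cons t ts' ih =>
    intro ps
    rw [List.foldl_cons, ih, pv_flatMap_flatMap]
    simp [pvTokensRec]

theorem pv_tokens_port (ts : List String) (cs : List Char) :
    pvTokens ts cs = pvTokensRec ts cs := by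
  unfold pvTokens
  rw [pv_tokens_flatMap]
  simp

-- the heart, part 1: A's sentinel marking + split equals B's recursive nested splitting
theorem pv_tokens_eq (m : Char) : ∀ (ts : List String) (cs : List Char),
    (∀ t ∈ ts, m ∉ t.toList) → m ∉ cs →
    pvRsplit m [] (pvFold m ts cs) = pvTokensRec ts cs := by
  intro ts
  induction ts with
  | nil =>
    intro cs _ hcs
    simp only [pvFold, List.foldl_nil, pvTokensRec]
    exact pv_rsplit_no_marker m cs hcs
  | cons t ts' ih =>
    intro cs hm hcs
    have hm' : ∀ t' ∈ ts', m ∉ t'.toList := fun t' ht' => hm t' (List.mem_cons_of_mem _ ht')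
    have hstep : pvFold m (t :: ts') cs = pvFold m ts' (PySem.Chars.replace cs t.toList [m]) := by
      simp [pvFold]
    rw [hstep, pv_replace_intercalate_split1 m t.toList cs,
      pv_split_fold_intercalate m ts' hm' _ (pv_split1_ne_nil t.toList cs)]
    simp only [pvTokensRec]
    rw [List.flatMap_def, List.flatMap_def]
    congr 1
    exact List.map_congr_left
      (fun p hp => ih p hm' (pv_split1_mfree m t.toList cs hcs p hp))

-- ordered disjoint-occurrence predicate: the token list occurs left to right in cs
inductive pvOcc : List (List Char) → List Char → Prop
  | nil (cs : List Char) : pvOcc [] cs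
  | cons (v : List Char) (L : List (List Char)) (w rest : List Char) :
      pvOcc L rest → pvOcc (v :: L) (w ++ v ++ rest)

theorem pvOcc_prepend (L : List (List Char)) (x cs : List Char) (h : pvOcc L cs) :
    pvOcc L (x ++ cs) := by
  cases h with
  | nil => exact pvOcc.nil _
  | cons v L w rest hrest =>
    have := pvOcc.cons v L (x ++ w) rest hrest
    simpa [List.append_assoc] using this

theorem pvOcc_append (L1 L2 : List (List Char)) (a b : List Char)
    (h1 : pvOcc L1 a) (h2 : pvOcc L2 b) : pvOcc (L1 ++ L2) (a ++ b) := by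
  induction h1 generalizing b with
  | nil cs => exact pvOcc_prepend L2 cs b h2
  | cons v L w rest hrest ih =>
    have := pvOcc.cons v (L ++ L2) w (rest ++ b) (ih b h2)
    simpa [List.append_assoc] using this

theorem pv_intercalate_nil (xs : List (List Char)) :
    List.intercalate ([] : List Char) xs = xs.flatten := by
  induction xs with
  | nil => simp [List.intercalate]
  | cons x xs' ih =>
    cases xs' with
    | nil => simp [List.intercalate]
    | cons y t =>
      rw [pv_intercalate_cons [] x (y :: t) (by simp)]
      simp [ih]

theorem pv_intercalate_split1_id (t' cs : List Char) :
    List.intercalate t' (pvSplit1 t' cs) = cs := by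
  cases t' with
  | nil =>
    unfold pvSplit1
    rw [if_pos (by simp), pv_intercalate_nil]
    simp only [List.flatten_append, List.flatten_cons, List.flatten_nil]
    induction cs with
    | nil => simp
    | cons c r ihc => simpa using ihc
  | cons a t =>
    unfold pvSplit1
    rw [if_neg (by simp), pv_splitOn_eq]
    exact pv_intercalate_rsplit a t cs

theorem pvOcc_flatMap (t' : List Char) (f : List Char → List (List Char))
    (ps : List (List Char)) (h : ∀ p ∈ ps, pvOcc (f p) p) :
    pvOcc (ps.flatMap f) (List.intercalate t' ps) := by
  induction ps with
  | nil => exact pvOcc.nil _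
  | cons p ps' ih =>
    cases ps' with
    | nil =>
      simp only [List.flatMap_cons, List.flatMap_nil, List.append_nil, List.intercalate,
        List.intersperse, List.flatten]
      simpa using h p List.mem_cons_self
    | cons q qs =>
      rw [pv_intercalate_cons t' p (q :: qs) (by simp), List.flatMap_cons, List.append_assoc]
      exact pvOcc_append _ _ _ _ (h p List.mem_cons_self)
        (pvOcc_prepend _ t' _ (ih (fun p' hp' => h p' (List.mem_cons_of_mem _ hp'))))

theorem pvOcc_tokens (ts : List String) (cs : List Char) : pvOcc (pvTokensRec ts cs) cs := by
  induction ts generalizing cs with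
  | nil =>
    have := pvOcc.cons cs [] [] [] (pvOcc.nil [])
    simpa using this
  | cons t ts' ih =>
    have hid := pv_intercalate_split1_id t.toList cs
    conv_rhs => rw [← hid]
    exact pvOcc_flatMap t.toList (pvTokensRec ts') (pvSplit1 t.toList cs)
      (fun p _ => ih p)

-- proof-side names for the two reconstruction loop bodies (definitionally the ports' lambdas)
def pvAStep (st : List Char × List Char) (v : List Char) : List Char × List Char :=
  if v.length = 0 then st
  else
    let i := PySem.Chars.find st.2 v
    let q := st.1 ++ PySem.Chars.slice st.2 none (some i) ++
      (if isNumberOrBoolOrNone v then v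
       else if (PySem.Chars.startswith v ['\''] && PySem.Chars.endswith v ['\'']) ||
               (PySem.Chars.startswith v ['"'] && PySem.Chars.endswith v ['"']) then v
       else '"' :: (v ++ ['"']))
    (q, PySem.Chars.slice st.2 (some (i + (v.length : Int))) none)

def pvBStep (S : List Char) (st : List Char × Int) (v : List Char) : List Char × Int :=
  if v.isEmpty then st
  else
    let stIdx := PySem.Chars.findFrom S v st.2 none
    (st.1 ++ PySem.Chars.slice S (some st.2) (some stIdx) ++ pvWrap v,
     stIdx + (v.length : Int))

theorem pvOcc_cons_inv (v : List Char) (L : List (List Char)) (cs : List Char)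
    (h : pvOcc (v :: L) cs) : ∃ w rest, cs = w ++ v ++ rest ∧ pvOcc L rest := by
  cases h with
  | cons _ _ w rest hrest => exact ⟨w, rest, rfl, hrest⟩

-- the heart, part 2: A's shrinking-slice reconstruction equals B's index-tracking sweep
theorem pv_rec (S : List Char) : ∀ (toks : List (List Char)) (q : List Char) (pos : Nat),
    pos ≤ S.length → pvOcc toks (S.drop pos) →
    ((toks.foldl pvAStep (q, S.drop pos)).1 ++ (toks.foldl pvAStep (q, S.drop pos)).2)
      = ((toks.foldl (pvBStep S) (q, (pos : Int))).1
          ++ PySem.Chars.slice S (some (toks.foldl (pvBStep S) (q, (pos : Int))).2) none) := by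
  intro toks
  induction toks with
  | nil =>
    intro q pos hpos hOcc
    simp only [List.foldl_nil, PySem.Chars.slice_eq_listSlice]
    rw [PySem.List.slice_from_natCast]
  | cons v toks' ih =>
    intro q pos hpos hOcc
    by_cases hv : v = []
    · subst hv
      rw [List.foldl_cons, List.foldl_cons]
      have hA : pvAStep (q, S.drop pos) [] = (q, S.drop pos) := by simp [pvAStep]
      have hB : pvBStep S (q, (pos : Int)) [] = (q, (pos : Int)) := by simp [pvBStep]
      rw [hA, hB]
      obtain ⟨w, rest, hwr, hrest⟩ := pvOcc_cons_inv [] toks' _ hOcc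
      apply ih q pos hpos
      rw [hwr]
      simpa using pvOcc_prepend toks' w rest hrest
    · obtain ⟨w, rest, hwr, hrest⟩ := pvOcc_cons_inv v toks' _ hOcc
      have hinf : v <:+: S.drop pos := ⟨w, rest, by rw [hwr, List.append_assoc]⟩
      have hfind0 : 0 ≤ PySem.Chars.find (S.drop pos) v :=
        (PySem.Chars.find_nonneg_iff _ _).mpr hinf
      obtain ⟨i, hfi⟩ : ∃ i : Nat, PySem.Chars.find (S.drop pos) v = (i : Int) :=
        ⟨_, (Int.toNat_of_nonneg hfind0).symm⟩
      have hspec := PySem.Chars.find_spec (s := S.drop pos) (sub := v) hfind0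
      rw [hfi] at hspec
      have hpre : v <+: (S.drop pos).drop i := by simpa using hspec.1
      have hmin : ∀ j, j < i → ¬ v <+: (S.drop pos).drop j := by simpa using hspec.2
      have hiw : i ≤ w.length := by
        by_contra hlt
        push_neg at hlt
        refine hmin w.length hlt ?_
        rw [hwr, List.append_assoc, List.drop_left]
        exact List.prefix_append v rest
      have hlen1 : i + v.length ≤ (S.drop pos).length := by
        have h1 : v.length ≤ ((S.drop pos).drop i).length := hpre.length_le
        have h2 : i ≤ (S.drop pos).length := by
          rw [hwr]
          simp only [List.length_append]
          omega
        simp only [List.length_drop] at h1 h2 ⊢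
        omega
      have hlenS : (S.drop pos).length = S.length - pos := by simp
      rw [List.foldl_cons, List.foldl_cons]
      have hvlen0 : ¬ v.length = 0 := by simp [List.length_eq_zero_iff, hv]
      have hAstep : pvAStep (q, S.drop pos) v
          = (q ++ (S.drop pos).take i ++ pvWrap v, (S.drop pos).drop (i + v.length)) := by
        unfold pvAStep pvWrap
        rw [if_neg hvlen0]
        rw [hfi]
        simp only [PySem.Chars.slice_eq_listSlice]
        rw [PySem.List.slice_to_natCast]
        have hc : (i : Int) + (v.length : Int) = ((i + v.length : Nat) : Int) := by push_cast; ring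
        rw [hc, PySem.List.slice_from_natCast]
      have hidx : (pos : Int) + (i : Int) = ((pos + i : Nat) : Int) := by push_cast; ring
      have hBstep : pvBStep S (q, (pos : Int)) v
          = (q ++ (S.drop pos).take i ++ pvWrap v, ((pos + i + v.length : Nat) : Int)) := by
        unfold pvBStep
        rw [if_neg (by simp [List.isEmpty_iff, hv])]
        rw [PySem.Chars.findFrom_natCast S v pos hpos, hfi]
        rw [if_neg (by omega)]
        rw [hidx]
        simp only [PySem.Chars.slice_eq_listSlice]
        rw [PySem.List.slice_toNat S (Int.natCast_nonneg pos) (Int.natCast_nonneg (pos + i))]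
        simp only [Int.toNat_natCast, Prod.mk.injEq]
        constructor
        · have : pos + i - pos = i := by omega
          rw [this]
        · push_cast
          ring
      rw [hAstep, hBstep]
      have hdrop' : (S.drop pos).drop (i + v.length) = S.drop (pos + i + v.length) := by
        rw [List.drop_drop]
        congr 1
        omega
      have hpos' : pos + i + v.length ≤ S.length := by omega
      have hrest_eq : rest = (S.drop pos).drop (w.length + v.length) := by
        rw [hwr]
        rw [show w ++ v ++ rest = (w ++ v) ++ rest from by rw [List.append_assoc]]
        rw [show w.length + v.length = (w ++ v).length from (List.length_append).symm]
        rw [List.drop_left]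
      have hOcc' : pvOcc toks' (S.drop (pos + i + v.length)) := by
        rw [← hdrop']
        have hXdecomp : ((S.drop pos).drop (i + v.length)).drop (w.length - i)
            = (S.drop pos).drop (w.length + v.length) := by
          rw [List.drop_drop]
          congr 1
          omega
        have hocc2 : pvOcc toks'
            (((S.drop pos).drop (i + v.length)).take (w.length - i)
              ++ ((S.drop pos).drop (i + v.length)).drop (w.length - i)) :=
          pvOcc_prepend toks' _ _ (by rw [hXdecomp, ← hrest_eq]; exact hrest)
        simpa [List.take_append_drop] using hocc2
      rw [hdrop']
      exact ih _ (pos + i + v.length) hpos' hOcc'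

-- the effective split tokens (identical default computation in both ports)
def pvSplits (s : String) (split_chars : Option (List String)) : List String :=
  match split_chars with
  | none =>
    let base : List String := ["[", "]", "{", "}", ",", " "]
    if PySem.Str.isIn "{" s && PySem.Str.isIn "}" s then base ++ [":"] else base
  | some l => l

-- ===== VERDICT (by name: the statement is the Claim_ definition above) =====
theorem add_quotation_to_string_spec : Claim_equal_add_quotation_to_string := by
  intro s sc hdom
  unfold Spec_add_quotation_to_string
  have hm : Char.ofNat 1 ∉ s.toList := by
    intro hmem
    simp only [Dom_add_quotation_to_string, Bool.and_eq_true] at hdom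
    have hall := hdom.1
    unfold pvDomStr at hall
    have h1 := List.all_eq_true.mp hall _ hmem
    exact absurd h1 (by decide)
  have hmf : ∀ t ∈ pvSplits s sc, Char.ofNat 1 ∉ t.toList := by
    cases sc with
    | none =>
      intro t ht
      simp only [pvSplits] at ht
      split at ht
      · simp at ht
        rcases ht with rfl | rfl | rfl | rfl | rfl | rfl | rfl <;> decide
      · simp at ht
        rcases ht with rfl | rfl | rfl | rfl | rfl | rfl <;> decide
    | some l =>
      intro t ht hmem
      simp only [Dom_add_quotation_to_string, Bool.and_eq_true, Option.map_some,
        Option.getD_some] at hdom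
      have h2 := List.all_eq_true.mp hdom.2 t ht
      unfold pvDomStr at h2
      have h3 := List.all_eq_true.mp h2 _ hmem
      exact absurd h3 (by decide)
  have hA : add_quotation_to_string s sc
      = String.mk
          ((((PySem.Chars.splitOn (pvFold (Char.ofNat 1) (pvSplits s sc) s.toList)
              [Char.ofNat 1]).foldl pvAStep (([], s.toList) : List Char × List Char)).1)
            ++ (((PySem.Chars.splitOn (pvFold (Char.ofNat 1) (pvSplits s sc) s.toList)
              [Char.ofNat 1]).foldl pvAStep (([], s.toList) : List Char × List Char)).2)) := by
    cases sc <;> rfl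
  have hB : add_quotation_to_string_alt s sc
      = String.mk
          ((((pvTokens (pvSplits s sc) s.toList).foldl (pvBStep s.toList)
              (([], 0) : List Char × Int)).1)
            ++ PySem.Chars.slice s.toList
              (some (((pvTokens (pvSplits s sc) s.toList).foldl (pvBStep s.toList)
                (([], 0) : List Char × Int)).2)) none) := by
    cases sc <;> rfl
  rw [hA, hB]
  have htok : PySem.Chars.splitOn (pvFold (Char.ofNat 1) (pvSplits s sc) s.toList)
      [Char.ofNat 1] = pvTokens (pvSplits s sc) s.toList := by
    rw [pv_splitOn_eq (Char.ofNat 1) [], pv_tokens_port]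
    exact pv_tokens_eq (Char.ofNat 1) (pvSplits s sc) s.toList hmf hm
  rw [htok]
  congr 1
  have hmain := pv_rec s.toList (pvTokens (pvSplits s sc) s.toList) [] 0
    (by simp)
    (by rw [pv_tokens_port]; simpa using pvOcc_tokens (pvSplits s sc) s.toList)
  simpa using hmain
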